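-- pv_equiv track=rewrite | github.com/little-worm/ICASSP2025 | catMICCAI24Code/Cat_MICCAI/my_miccai_getdata/gen_all_subject_sorted_list.py | my_find_fileList_accordingTo_strList
-- ===== SOURCE A (Python) =====
-- def my_find_fileList_accordingTo_strList(str_list,file_list):
--     org_data_list = []
--     for str in str_list:
--         tmp_data = None
--         for file in file_list:
--             if str in file:
--                 tmp_data = file
--         assert not(tmp_data==None),"my file not in dataset"
--         org_data_list.append(tmp_data)
--     return org_data_list
-- ===== SOURCE B (Python) =====
-- def my_find_fileList_accordingTo_strList(str_list, file_list):
--     # Stage 1: single pass over file_list builds an index: query -> most recent file containing it.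
--     last_match = {}
--     for file in file_list:
--         for s in str_list:
--             if s in file:
--                 last_match[s] = file
--     # Stage 2: read the index in query order.
--     org_data_list = []
--     for s in str_list:
--         tmp_data = last_match.get(s)
--         assert not (tmp_data == None), "my file not in dataset"
--         org_data_list.append(tmp_data)
--     return org_data_list
-- ===== Notes on version B (the rewrite author's own statement) =====
-- stated objective: alternative
-- what changed: Inverts the loop nesting and stages the work: one pass over file_list maintains a dict mapping each query string to the most recent file containing it, then a second pass over str_list reads the index, instead of a fresh exhaustive scan of file_list per query.
import Mathlib
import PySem

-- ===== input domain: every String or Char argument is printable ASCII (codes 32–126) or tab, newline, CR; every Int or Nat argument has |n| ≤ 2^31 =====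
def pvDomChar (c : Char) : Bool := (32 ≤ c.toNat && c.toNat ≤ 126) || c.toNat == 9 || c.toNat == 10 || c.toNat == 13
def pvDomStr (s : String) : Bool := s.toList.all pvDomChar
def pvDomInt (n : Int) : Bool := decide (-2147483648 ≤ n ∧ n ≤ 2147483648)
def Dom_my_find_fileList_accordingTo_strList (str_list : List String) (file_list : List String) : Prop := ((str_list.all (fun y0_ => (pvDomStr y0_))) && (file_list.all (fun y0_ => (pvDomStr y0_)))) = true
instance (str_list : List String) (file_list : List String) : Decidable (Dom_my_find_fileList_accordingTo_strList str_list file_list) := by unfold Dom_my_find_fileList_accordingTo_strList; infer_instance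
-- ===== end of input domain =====

-- B restructures A: one pass over file_list builds a query→last-matching-file dict, then str_list reads it
-- (an alternative staged decomposition, same asymptotic cost); inputs where A's assert fires are outside Pre_.

-- ===== PORT A =====
-- A: per query string, a fresh exhaustive forward scan of file_list overwriting tmp_data (last match wins);
-- the assert is excluded by Pre_ (outside Pre_ this port returns "" in that slot).
def my_find_fileList_accordingTo_strList (str_list : List String) (file_list : List String) : List String :=
  str_list.foldl (fun org_data_list s =>
    let tmp_data : Option String :=
      file_list.foldl (fun acc f => if PySem.Str.isIn s f then some f else acc) none
    org_data_list ++ [tmp_data.getD ""]) []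

-- ===== PORT B =====
-- B stage 1: one pass over file_list; for each file, update the dict entry of every query it contains.
def pvBuildLastMatch (str_list : List String) (file_list : List String) : PySem.Dict String String :=
  file_list.foldl (fun d f =>
    str_list.foldl (fun d s => if PySem.Str.isIn s f then d.insert s f else d) d)
    PySem.Dict.empty

-- B stage 2: read the index in query order (the assert is excluded by Pre_; "" in that slot otherwise).
def my_find_fileList_accordingTo_strList_alt (str_list : List String) (file_list : List String) : List String :=
  let last_match := pvBuildLastMatch str_list file_list
  str_list.map (fun s => (last_match.get? s).getD "")

-- ===== PRECONDITION & SPEC =====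
-- Pre_ excludes exactly the inputs on which A's assert fires (some query string occurs in no file):
-- there Python A raises AssertionError and returns nothing.
def Pre_my_find_fileList_accordingTo_strList (str_list : List String) (file_list : List String) : Prop :=
  ∀ s ∈ str_list, ∃ f ∈ file_list, PySem.Str.isIn s f = true
instance (str_list : List String) (file_list : List String) : Decidable (Pre_my_find_fileList_accordingTo_strList str_list file_list) := by unfold Pre_my_find_fileList_accordingTo_strList; infer_instance
def pvWitness_my_find_fileList_accordingTo_strList : List String × List String :=
  (["a", "bc"], ["xbc", "za", "abc"])
def Spec_my_find_fileList_accordingTo_strList (str_list : List String) (file_list : List String) (out : List String) : Prop := out = my_find_fileList_accordingTo_strList_alt str_list file_list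
instance (str_list : List String) (file_list : List String) (out : List String) : Decidable (Spec_my_find_fileList_accordingTo_strList str_list file_list out) := by unfold Spec_my_find_fileList_accordingTo_strList; infer_instance

-- ===== CLAIM =====
def Claim_equal_my_find_fileList_accordingTo_strList : Prop := ∀ (str_list : List String) (file_list : List String), Dom_my_find_fileList_accordingTo_strList str_list file_list → Pre_my_find_fileList_accordingTo_strList str_list file_list → Spec_my_find_fileList_accordingTo_strList str_list file_list (my_find_fileList_accordingTo_strList str_list file_list)

-- ===== LEMMAS AND PROOFS =====

-- One file's inner update pass, read back at s: it sets s exactly when s is a matching query.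
theorem pv_inner_get (L : List String) (f : String) (d : PySem.Dict String String) (s : String) :
    (L.foldl (fun d s' => if PySem.Str.isIn s' f then d.insert s' f else d) d).get? s
      = if s ∈ L ∧ PySem.Str.isIn s f then some f else d.get? s := by
  induction L generalizing d with
  | nil => simp
  | cons a L ih =>
      simp only [List.foldl_cons, ih]
      by_cases hsa : s = a
      · subst hsa
        cases h : PySem.Str.isIn s f <;> simp [h, PySem.Dict.get?_insert_self]
      · cases h : PySem.Str.isIn a f
        · simp [h, List.mem_cons, hsa]
        · simp [List.mem_cons, hsa, PySem.Dict.get?_insert_of_ne _ _ hsa]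

-- The built index, read at a query string s, equals A's forward last-match fold over file_list.
theorem pv_build_get (str_list : List String) (s : String) (hs : s ∈ str_list)
    (FL : List String) (d : PySem.Dict String String) :
    (FL.foldl (fun d f =>
        str_list.foldl (fun d s' => if PySem.Str.isIn s' f then d.insert s' f else d) d) d).get? s
      = FL.foldl (fun acc f => if PySem.Str.isIn s f then some f else acc) (d.get? s) := by
  induction FL generalizing d with
  | nil => rfl
  | cons f FL ih =>
      simp only [List.foldl_cons, ih, pv_inner_get]
      cases h : PySem.Str.isIn s f <;> simp [h, hs]

theorem pv_eq (str_list file_list : List String) :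
    my_find_fileList_accordingTo_strList str_list file_list
      = my_find_fileList_accordingTo_strList_alt str_list file_list := by
  unfold my_find_fileList_accordingTo_strList my_find_fileList_accordingTo_strList_alt
  rw [PySem.List.foldl_append_singleton_eq_map]
  apply List.map_congr_left
  intro s hs
  rw [pvBuildLastMatch, pv_build_get str_list s hs file_list PySem.Dict.empty,
    PySem.Dict.get?_empty]

-- ===== VERDICT =====
theorem my_find_fileList_accordingTo_strList_spec : Claim_equal_my_find_fileList_accordingTo_strList := by
  intro str_list file_list _ _
  exact pv_eq str_list file_list
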